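-- pv_equiv track=rewrite | github.com/Ch3shireDev/Zajecia-przerwa | konkurs/PWN31_2_z3.py | czslowo
-- ===== SOURCE A (Python) =====
-- def czslowo(slowo):
--     wagi = []
--     x = 1
--     for i in range(len(slowo)):
--         if len(slowo) % 2 == 0 and i == len(slowo)//2:
--             x -= 1
--         wagi += [x]
--         if i+1 > len(slowo)//2:
--             x -= 1
--         else:
--             x += 1
--     return wagi
-- ===== SOURCE B (Python) =====
-- def czslowo(slowo):
--     return [min(i + 1, len(slowo) - i) for i in range(len(slowo))]
-- ===== Notes on version B (the rewrite author's own statement) =====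
-- stated objective: simpler
-- what changed: Replaced the stateful loop carrying a running weight x with parity/midpoint special cases by a pure closed form: each weight is min(i+1, n-i), the distance to the nearer end, computed independently per index.
import Mathlib
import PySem

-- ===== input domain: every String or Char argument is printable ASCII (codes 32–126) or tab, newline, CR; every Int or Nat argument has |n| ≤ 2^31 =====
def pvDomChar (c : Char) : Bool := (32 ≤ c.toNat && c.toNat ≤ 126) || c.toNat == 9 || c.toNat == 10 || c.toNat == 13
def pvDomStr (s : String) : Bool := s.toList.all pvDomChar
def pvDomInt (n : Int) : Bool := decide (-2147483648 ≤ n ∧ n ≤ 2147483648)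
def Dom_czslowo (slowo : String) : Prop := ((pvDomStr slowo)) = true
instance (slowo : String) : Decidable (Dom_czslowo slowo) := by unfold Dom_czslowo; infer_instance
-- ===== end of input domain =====

-- B replaces A's stateful loop (running weight x with parity/midpoint branches) by the
-- closed form min(i+1, n-i) per index; objective: simpler. Both are total.

-- ===== PORT A =====
-- one iteration of A's for-loop: state = (wagi, x)
def czslowoStep (n : Int) (st : List Int × Int) (i : Int) : List Int × Int :=
  let x := if PySem.Int.mod n 2 = 0 ∧ i = PySem.Int.floordiv n 2 then st.2 - 1 else st.2
  let wagi := st.1 ++ [x]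
  if i + 1 > PySem.Int.floordiv n 2 then (wagi, x - 1) else (wagi, x + 1)

def czslowo (slowo : String) : List Int :=
  ((PySem.List.pyRange 0 (PySem.Str.len slowo) 1).foldl
      (czslowoStep (PySem.Str.len slowo)) ([], 1)).1

-- ===== PORT B =====
def czslowo_alt (slowo : String) : List Int :=
  (PySem.List.pyRange 0 (PySem.Str.len slowo) 1).map
    (fun i => min (i + 1) (PySem.Str.len slowo - i))

-- ===== PRECONDITION & SPEC =====
def Spec_czslowo (slowo : String) (out : List Int) : Prop := out = czslowo_alt slowo
instance (slowo : String) (out : List Int) : Decidable (Spec_czslowo slowo out) := by unfold Spec_czslowo; infer_instance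

-- ===== CLAIM (what is proved, stated in full; the proofs are below) =====
def Claim_equal_czslowo : Prop := ∀ (slowo : String), Dom_czslowo slowo → Spec_czslowo slowo (czslowo slowo)

-- ===== LEMMAS AND PROOFS =====

-- the value of x on entry to iteration k of A's loop
def czslowoG (N k : ℕ) : Int := if 2 * k ≤ N then (k : Int) + 1 else (N : Int) - k

theorem czslowoStep_eq (N k : ℕ) (_hk : k < N) (acc : List Int) :
    czslowoStep (N : Int) (acc, czslowoG N k) (k : Int)
      = (acc ++ [min ((k : Int) + 1) ((N : Int) - k)], czslowoG N (k + 1)) := by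
  simp only [czslowoStep, czslowoG]
  split_ifs with h1 h2 h3 h4 h5 h6 h7 h8 h9 h10 h11 h12 <;>
    refine Prod.ext ?_ ?_ <;> simp at * <;> omega

theorem czslowo_loop (N : ℕ) : ∀ (m k : ℕ) (acc : List Int), k + m = N →
    (((List.range' k m).map (fun (j : ℕ) => (j : Int))).foldl
        (czslowoStep (N : Int)) (acc, czslowoG N k)).1
      = acc ++ (List.range' k m).map (fun (j : ℕ) => min ((j : Int) + 1) ((N : Int) - j)) := by
  intro m
  induction m with
  | zero => intro k acc h; simp
  | succ m ih =>
      intro k acc h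
      rw [List.range'_succ]
      show (((k :: List.range' (k+1) m).map (fun (j : ℕ) => (j : Int))).foldl
              (czslowoStep (N : Int)) (acc, czslowoG N k)).1 = _
      rw [List.map_cons, List.foldl_cons,
        czslowoStep_eq N k (by omega) acc, ih (k + 1) _ (by omega)]
      simp

theorem czslowo_spec : Claim_equal_czslowo := by
  intro slowo _
  unfold Spec_czslowo czslowo czslowo_alt
  rw [PySem.Str.len_eq, PySem.List.pyRange_one]
  simp only [sub_zero, Int.toNat_natCast, zero_add]
  have hrange : (List.range slowo.toList.length) = List.range' 0 slowo.toList.length :=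
    List.range_eq_range'
  rw [hrange]
  have h := czslowo_loop slowo.toList.length slowo.toList.length 0 [] (by omega)
  rw [List.map_map]
  simpa [czslowoG, Function.comp] using h
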